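-- pv_equiv track=rewrite | github.com/zhonguochong/leetcoding | find_max_matrix.py | max_1_bordered_matrix
-- ===== SOURCE A (Python) =====
-- def max_1_bordered_matrix(grid):
--     if len(grid) == 0 or len(grid[0]) == 0:
--         return 0
--
--     maxLen = 0
--     m, n = len(grid), len(grid[0])
--     # 遍历每个点
--     for i in range(m):
--         for j in range(n):
--             if grid[i][j] == 1:
--                 flag1 = True
--                 currLen = maxLen
--                 while i + currLen < m and j + currLen < n:
--                     flag2 = True
--                     # 如果‘左边界‘有0， 那么检查下一个点
--                     for a in range(i, i + currLen + 1):
--                         if grid[a][j] != 1: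
--                             flag1 = False
--                             break
--                     if not flag1:
--                         break
--                     # 如果‘上边界‘有0， 那么检查下一个点
--                     for b in range(j, j + currLen + 1):
--                         if grid[i][b] != 1:
--                             flag1 = False
--                             break
--                     if not flag1:
--                         break
--                     # 如果’右边界’有0， 那么继续在这一点，检查边长+1的正方形
--                     for a in range(i, i + currLen + 1):
--                         if grid[a][j + currLen] != 1:
--                             currLen += 1
--                             flag2 = False
--                             break
--                     if not flag2:
--                         continue
--                     # 如果’下边界’有0， 那么继续在这一点，检查边长+1的正方形
--                     for b in range(j, j + currLen + 1):
--                         if grid[i + currLen][b] != 1: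
--                             currLen += 1
--                             flag2 = False
--                             break
--                     if not flag2:
--                         continue
--                     currLen += 1
--                     maxLen = currLen
--     return maxLen
-- ===== SOURCE B (Python) =====
-- def max_1_bordered_matrix(grid):
--     if len(grid) == 0 or len(grid[0]) == 0:
--         return 0
--     m, n = len(grid), len(grid[0])
--     # right[i][j] = run of 1s starting at (i,j) going right (within the first n columns)
--     # down[i][j]  = run of 1s starting at (i,j) going down
--     right = [None] * m
--     down = [None] * m
--     next_down = [0] * n
--     for i in range(m - 1, -1, -1):
--         rrow = [0] * n
--         drow = [0] * n
--         run = 0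
--         for j in range(n - 1, -1, -1):
--             if grid[i][j] == 1:
--                 run += 1
--                 d = next_down[j] + 1
--             else:
--                 run = 0
--                 d = 0
--             rrow[j] = run
--             drow[j] = d
--         right[i] = rrow
--         down[i] = drow
--         next_down = drow
--     best = 0
--     for i in range(m):
--         for j in range(n):
--             # top and left borders of a side-k square at (i,j) are 1s iff
--             # k <= right[i][j] and k <= down[i][j]; scan sides downward
--             k = min(right[i][j], down[i][j])
--             while k > best:
--                 if right[i + k - 1][j] >= k and down[i][j + k - 1] >= k:
--                     best = k
--                     break
--                 k -= 1
--     return best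
-- ===== Notes on version B (the rewrite author's own statement) =====
-- stated objective: alternative
-- what changed: A re-scans whole borders cell by cell for every candidate square at every anchor, seeding each anchor's search with the best side so far; B precomputes right/down run-length tables in one reverse pass and then decides each candidate square with two O(1) table lookups, capping each anchor's candidate side by min(right,down) and scanning downward with an early cutoff at the best side found; measured speed depends on the input shape (B wins on A's worst cases, A's pruning wins on random grids), so no speed is claimed.
import Mathlib
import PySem

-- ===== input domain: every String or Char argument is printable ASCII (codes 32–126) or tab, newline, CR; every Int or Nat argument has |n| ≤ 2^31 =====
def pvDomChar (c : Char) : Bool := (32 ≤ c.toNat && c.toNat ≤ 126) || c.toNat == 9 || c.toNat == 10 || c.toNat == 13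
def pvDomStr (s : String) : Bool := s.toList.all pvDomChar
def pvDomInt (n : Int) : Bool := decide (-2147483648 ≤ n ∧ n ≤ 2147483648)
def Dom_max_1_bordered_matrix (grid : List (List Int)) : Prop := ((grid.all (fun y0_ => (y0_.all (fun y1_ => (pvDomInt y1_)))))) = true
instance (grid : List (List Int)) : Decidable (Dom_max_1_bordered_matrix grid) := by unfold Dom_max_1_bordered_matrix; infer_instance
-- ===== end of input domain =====

-- B replaces A's per-anchor re-scanning of whole borders by precomputed right/down
-- run-length tables, so each candidate square is checked with two O(1) lookups
-- (objective: alternative — a different algorithm of comparable measured cost).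
-- Equivalence is about the RETURN value; neither program mutates its argument.

-- ===== PORT A =====

-- grid[i][j]; all accesses made by either program are in range on inputs satisfying
-- Pre_, so the getD defaults are never consulted there.
def pvCell (g : List (List Int)) (i j : Nat) : Int := (g.getD i []).getD j 0

-- the `while i + currLen < m and j + currLen < n` loop of A; fuel m is enough since
-- currLen grows by 1 every iteration.  Each `for …: if grid[..] != 1: break` scan is
-- transliterated as an `.all` over the same index range (same traversal, flag = result).
def pvAWhile (g : List (List Int)) (m n i j : Nat) : Nat → Nat → Nat → Nat
  | 0, _, maxLen => maxLen
  | fuel+1, c, maxLen =>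
    if i + c < m ∧ j + c < n then
      -- left border has a 0 → flag1, break out of the while loop
      if ¬ ((List.range' i (c+1)).all (fun a => pvCell g a j == 1)) then maxLen
      -- top border has a 0 → flag1, break
      else if ¬ ((List.range' j (c+1)).all (fun b => pvCell g i b == 1)) then maxLen
      -- right border has a 0 → currLen += 1, continue
      else if ¬ ((List.range' i (c+1)).all (fun a => pvCell g a (j+c) == 1)) then
        pvAWhile g m n i j fuel (c+1) maxLen
      -- bottom border has a 0 → currLen += 1, continue
      else if ¬ ((List.range' j (c+1)).all (fun b => pvCell g (i+c) b == 1)) then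
        pvAWhile g m n i j fuel (c+1) maxLen
      -- full border of side currLen+1: currLen += 1; maxLen = currLen
      else pvAWhile g m n i j fuel (c+1) (c+1)
    else maxLen

def max_1_bordered_matrix (grid : List (List Int)) : Int :=
  if grid.length = 0 ∨ (grid.headD []).length = 0 then 0
  else
    let m := grid.length
    let n := (grid.headD []).length
    ((List.range m).foldl (fun maxLen i =>
        (List.range n).foldl (fun maxLen j =>
          if pvCell grid i j = 1 then pvAWhile grid m n i j m maxLen maxLen
          else maxLen) maxLen) 0 : Nat)

-- ===== PORT B =====

def pvGetT (t : List (List Nat)) (i j : Nat) : Nat := (t.getD i []).getD j 0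

-- one row of B's first phase, j descending; Python fills a preallocated [0]*n at
-- index j while iterating j = n-1..0, which is this front-cons fold (same order,
-- same values).  Carries rrow, drow and `run`.
def pvBRow (g : List (List Int)) (i n : Nat) (nextDown : List Nat) : List Nat × List Nat :=
  let st := (List.range n).reverse.foldl
    (fun (st : List Nat × List Nat × Nat) j =>
      if pvCell g i j = 1 then
        ((st.2.2 + 1) :: st.1, (nextDown.getD j 0 + 1) :: st.2.1, st.2.2 + 1)
      else (0 :: st.1, 0 :: st.2.1, 0))
    ([], [], 0)
  (st.1, st.2.1)

-- B's first phase: right and down tables, i descending, threading next_down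
def pvBTables (g : List (List Int)) (m n : Nat) : List (List Nat) × List (List Nat) :=
  let st := (List.range m).reverse.foldl
    (fun (st : List (List Nat) × List (List Nat) × List Nat) i =>
      let rows := pvBRow g i n st.2.2
      (rows.1 :: st.1, rows.2 :: st.2.1, rows.2))
    ([], [], List.replicate n 0)
  (st.1, st.2.1)

-- B's `while k > best:` loop, k counting down
def pvBInner (right down : List (List Nat)) (i j : Nat) : Nat → Nat → Nat
  | 0, best => best
  | k+1, best =>
    if best < k+1 then
      if k+1 ≤ pvGetT right (i+k) j ∧ k+1 ≤ pvGetT down i (j+k) then k+1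
      else pvBInner right down i j k best
    else best

def max_1_bordered_matrix_alt (grid : List (List Int)) : Int :=
  if grid.length = 0 ∨ (grid.headD []).length = 0 then 0
  else
    let m := grid.length
    let n := (grid.headD []).length
    let t := pvBTables grid m n
    ((List.range m).foldl (fun best i =>
        (List.range n).foldl (fun best j =>
          pvBInner t.1 t.2 i j (min (pvGetT t.1 i j) (pvGetT t.2 i j)) best) best) 0 : Nat)

-- ===== PRECONDITION & SPEC =====
-- Pre_ excludes exactly the ragged grids with a row shorter than the first row (and a
-- nonempty first row), on which Python A raises IndexError (B raises there too).
def Pre_max_1_bordered_matrix (grid : List (List Int)) : Prop :=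
  ∀ row ∈ grid, (grid.headD []).length ≤ row.length
instance (grid : List (List Int)) : Decidable (Pre_max_1_bordered_matrix grid) := by
  unfold Pre_max_1_bordered_matrix; infer_instance
def pvWitness_max_1_bordered_matrix : List (List Int) := [[1, 1], [1, 0]]

def Spec_max_1_bordered_matrix (grid : List (List Int)) (out : Int) : Prop := out = max_1_bordered_matrix_alt grid
instance (grid : List (List Int)) (out : Int) : Decidable (Spec_max_1_bordered_matrix grid out) := by unfold Spec_max_1_bordered_matrix; infer_instance

-- ===== CLAIM (what is proved, stated in full; the proofs are below) =====
def Claim_equal_max_1_bordered_matrix : Prop := ∀ (grid : List (List Int)), Dom_max_1_bordered_matrix grid → Pre_max_1_bordered_matrix grid → Spec_max_1_bordered_matrix grid (max_1_bordered_matrix grid)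

-- ===== LEMMAS AND PROOFS =====

-- the border-of-ones square predicate both programs decide, anchored top-left at (i,j)
def pvOnesH (g : List (List Int)) (i j k : Nat) : Prop := ∀ t < k, pvCell g i (j+t) = 1
def pvOnesV (g : List (List Int)) (i j k : Nat) : Prop := ∀ t < k, pvCell g (i+t) j = 1
def pvSq (g : List (List Int)) (m n i j k : Nat) : Prop :=
  0 < k ∧ i + k ≤ m ∧ j + k ≤ n ∧ pvOnesH g i j k ∧ pvOnesV g i j k ∧
  pvOnesH g (i+(k-1)) j k ∧ pvOnesV g i (j+(k-1)) k

@[reducible] def pvSqDec (g : List (List Int)) (m n i j : Nat) : DecidablePred (pvSq g m n i j) :=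
  fun _ => by unfold pvSq pvOnesH pvOnesV; infer_instance

-- largest bordered square anchored top-left at (i,j)
def pvM (g : List (List Int)) (m n i j : Nat) : Nat :=
  @Nat.findGreatest (pvSq g m n i j) (pvSqDec g m n i j) (min (m - i) (n - j))

lemma pvSq_le (g : List (List Int)) (m n i j k : Nat) (h : pvSq g m n i j k) :
    k ≤ min (m - i) (n - j) := by
  obtain ⟨-, h1, h2, -⟩ := h; omega

lemma pvM_le (g : List (List Int)) (m n i j : Nat) : pvM g m n i j ≤ min (m - i) (n - j) := by
  letI := pvSqDec g m n i j
  exact Nat.findGreatest_le _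

lemma le_pvM (g : List (List Int)) (m n i j k : Nat) (h : pvSq g m n i j k) :
    k ≤ pvM g m n i j := by
  letI := pvSqDec g m n i j
  exact Nat.le_findGreatest (pvSq_le g m n i j k h) h

lemma pvM_spec (g : List (List Int)) (m n i j : Nat) (h : 0 < pvM g m n i j) :
    pvSq g m n i j (pvM g m n i j) := by
  letI := pvSqDec g m n i j
  obtain ⟨t, ht0, htle, htP⟩ := Nat.findGreatest_pos.1 h
  exact Nat.findGreatest_spec htle htP

-- ---- A side ----

lemma pvAll_range'_iff (f : Nat → Int) (s len : Nat) :
    ((List.range' s len).all (fun a => f a == 1)) = true ↔ ∀ t < len, f (s + t) = 1 := by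
  simp only [List.all_eq_true, List.mem_range'_1, beq_iff_eq]
  constructor
  · intro h t ht
    exact h (s + t) ⟨by omega, by omega⟩
  · rintro h a ⟨h1, h2⟩
    have := h (a - s) (by omega)
    rwa [show s + (a - s) = a by omega] at this

lemma pvAWhile_eq (g : List (List Int)) (m n i j : Nat) :
    ∀ fuel c s, s ≤ c → m ≤ i + c + fuel →
      pvAWhile g m n i j fuel c s = if c < pvM g m n i j then pvM g m n i j else s := by
  intro fuel
  induction fuel with
  | zero =>
    intro c s hs hf
    have := pvM_le g m n i j
    simp only [pvAWhile]
    rw [if_neg (by omega)]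
  | succ fuel ih =>
    intro c s hs hf
    simp only [pvAWhile]
    by_cases hb : i + c < m ∧ j + c < n
    · rw [if_pos hb]
      by_cases hleft : ((List.range' i (c+1)).all (fun a => pvCell g a j == 1)) = true
      · rw [if_neg (by simp [hleft])]
        by_cases htop : ((List.range' j (c+1)).all (fun b => pvCell g i b == 1)) = true
        · rw [if_neg (by simp [htop])]
          by_cases hright : ((List.range' i (c+1)).all (fun a => pvCell g a (j+c) == 1)) = true
          · rw [if_neg (by simp [hright])]
            by_cases hbot : ((List.range' j (c+1)).all (fun b => pvCell g (i+c) b == 1)) = true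
            · rw [if_neg (by simp [hbot])]
              -- full border of side c+1 found
              have hsq : pvSq g m n i j (c+1) := by
                refine ⟨by omega, by omega, by omega, ?_, ?_, ?_, ?_⟩
                · exact (pvAll_range'_iff (fun b => pvCell g i b) j (c+1)).1 htop
                · exact (pvAll_range'_iff (fun a => pvCell g a j) i (c+1)).1 hleft
                · exact (pvAll_range'_iff (fun b => pvCell g (i+c) b) j (c+1)).1 hbot
                · exact (pvAll_range'_iff (fun a => pvCell g a (j+c)) i (c+1)).1 hright
              have hM : c + 1 ≤ pvM g m n i j := le_pvM g m n i j (c+1) hsq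
              rw [ih (c+1) (c+1) le_rfl (by omega)]
              by_cases h2 : c + 1 < pvM g m n i j
              · rw [if_pos h2, if_pos (by omega)]
              · rw [if_neg h2, if_pos (by omega)]; omega
            · -- bottom border fails: no square of side exactly c+1 exists at (i,j)
              rw [if_pos (by simp [hbot]), ih (c+1) s (by omega) (by omega)]
              have hne : pvM g m n i j ≠ c + 1 := by
                intro he
                have hsq := pvM_spec g m n i j (by omega)
                rw [he] at hsq
                obtain ⟨-, -, -, -, -, hB, -⟩ := hsq
                exact hbot ((pvAll_range'_iff (fun b => pvCell g (i+c) b) j (c+1)).2 hB)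
              by_cases h2 : c < pvM g m n i j
              · rw [if_pos (by omega), if_pos h2]
              · rw [if_neg (by omega), if_neg h2]
          · -- right border fails
            rw [if_pos (by simp [hright]), ih (c+1) s (by omega) (by omega)]
            have hne : pvM g m n i j ≠ c + 1 := by
              intro he
              have hsq := pvM_spec g m n i j (by omega)
              rw [he] at hsq
              obtain ⟨-, -, -, -, -, -, hR⟩ := hsq
              exact hright ((pvAll_range'_iff (fun a => pvCell g a (j+c)) i (c+1)).2 hR)
            by_cases h2 : c < pvM g m n i j
            · rw [if_pos (by omega), if_pos h2]
            · rw [if_neg (by omega), if_neg h2]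
        · -- top border fails: no square of side ≥ c+1, so pvM ≤ c
          rw [if_pos (by simp [htop])]
          have hM : pvM g m n i j ≤ c := by
            by_contra hM
            have hsq := pvM_spec g m n i j (by omega)
            obtain ⟨-, -, -, hT, -⟩ := hsq
            exact htop ((pvAll_range'_iff (fun b => pvCell g i b) j (c+1)).2
              (fun t ht => hT t (by omega)))
          rw [if_neg (by omega)]
      · -- left border fails: no square of side ≥ c+1, so pvM ≤ c
        rw [if_pos (by simp [hleft])]
        have hM : pvM g m n i j ≤ c := by
          by_contra hM
          have hsq := pvM_spec g m n i j (by omega)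
          obtain ⟨-, -, -, -, hL, -⟩ := hsq
          exact hleft ((pvAll_range'_iff (fun a => pvCell g a j) i (c+1)).2
            (fun t ht => hL t (by omega)))
        rw [if_neg (by omega)]
    · rw [if_neg hb]
      have := pvM_le g m n i j
      rw [if_neg (by omega)]

lemma pvM_eq_zero_of_not_one (g : List (List Int)) (m n i j : Nat)
    (h : pvCell g i j ≠ 1) : pvM g m n i j = 0 := by
  by_contra hM
  have hsq := pvM_spec g m n i j (Nat.pos_of_ne_zero hM)
  obtain ⟨hk, -, -, hT, -⟩ := hsq
  exact h (hT 0 hk)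

lemma pvA_step (g : List (List Int)) (m n i j acc : Nat) :
    (if pvCell g i j = 1 then pvAWhile g m n i j m acc acc else acc) =
      max acc (pvM g m n i j) := by
  by_cases h : pvCell g i j = 1
  · rw [if_pos h, pvAWhile_eq g m n i j m acc acc le_rfl (by omega)]
    by_cases h2 : acc < pvM g m n i j
    · rw [if_pos h2]; omega
    · rw [if_neg h2]; omega
  · rw [if_neg h, pvM_eq_zero_of_not_one g m n i j h]; omega

-- ---- B side ----

-- pure versions of B's tables: run of 1s from (i,j) going right (resp. down),
-- by fuel = number of columns (rows) remaining
def pvRfAux (g : List (List Int)) (i : Nat) : Nat → Nat → Nat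
  | _, 0 => 0
  | j, d+1 => if pvCell g i j = 1 then pvRfAux g i (j+1) d + 1 else 0

def pvDfAux (g : List (List Int)) (j : Nat) : Nat → Nat → Nat
  | _, 0 => 0
  | i, d+1 => if pvCell g i j = 1 then pvDfAux g j (i+1) d + 1 else 0

def pvRf (g : List (List Int)) (n i j : Nat) : Nat := pvRfAux g i j (n - j)
def pvDf (g : List (List Int)) (m i j : Nat) : Nat := pvDfAux g j i (m - i)

lemma pvRfAux_ge_iff (g : List (List Int)) (i : Nat) :
    ∀ d j k, k ≤ pvRfAux g i j d ↔ (k ≤ d ∧ ∀ t < k, pvCell g i (j+t) = 1) := by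
  intro d
  induction d with
  | zero =>
    intro j k
    simp only [pvRfAux]
    constructor
    · intro hk; exact ⟨hk, fun t ht => by omega⟩
    · intro ⟨h1, _⟩; omega
  | succ d ih =>
    intro j k
    simp only [pvRfAux]
    match k with
    | 0 => simp
    | k+1 =>
      by_cases h : pvCell g i j = 1
      · rw [if_pos h, Nat.add_le_add_iff_right, ih (j+1) k]
        constructor
        · rintro ⟨h1, h2⟩
          refine ⟨by omega, fun t ht => ?_⟩
          match t with
          | 0 => simpa using h
          | t+1 =>
            have := h2 t (by omega)
            rwa [show j + 1 + t = j + (t+1) by omega] at this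
        · rintro ⟨h1, h2⟩
          refine ⟨by omega, fun t ht => ?_⟩
          have := h2 (t+1) (by omega)
          rwa [show j + (t+1) = j + 1 + t by omega] at this
      · rw [if_neg h]
        constructor
        · omega
        · rintro ⟨h1, h2⟩
          exact absurd (by simpa using h2 0 (by omega)) h

lemma pvDfAux_ge_iff (g : List (List Int)) (j : Nat) :
    ∀ d i k, k ≤ pvDfAux g j i d ↔ (k ≤ d ∧ ∀ t < k, pvCell g (i+t) j = 1) := by
  intro d
  induction d with
  | zero =>
    intro i k
    simp only [pvDfAux]
    constructor
    · intro hk; exact ⟨hk, fun t ht => by omega⟩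
    · intro ⟨h1, _⟩; omega
  | succ d ih =>
    intro i k
    simp only [pvDfAux]
    match k with
    | 0 => simp
    | k+1 =>
      by_cases h : pvCell g i j = 1
      · rw [if_pos h, Nat.add_le_add_iff_right, ih (i+1) k]
        constructor
        · rintro ⟨h1, h2⟩
          refine ⟨by omega, fun t ht => ?_⟩
          match t with
          | 0 => simpa using h
          | t+1 =>
            have := h2 t (by omega)
            rwa [show i + 1 + t = i + (t+1) by omega] at this
        · rintro ⟨h1, h2⟩
          refine ⟨by omega, fun t ht => ?_⟩
          have := h2 (t+1) (by omega)
          rwa [show i + (t+1) = i + 1 + t by omega] at this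
      · rw [if_neg h]
        constructor
        · omega
        · rintro ⟨h1, h2⟩
          exact absurd (by simpa using h2 0 (by omega)) h

lemma pvRf_ge_iff (g : List (List Int)) (n i j k : Nat) :
    k ≤ pvRf g n i j ↔ (k ≤ n - j ∧ pvOnesH g i j k) := pvRfAux_ge_iff g i (n - j) j k

lemma pvDf_ge_iff (g : List (List Int)) (m i j k : Nat) :
    k ≤ pvDf g m i j ↔ (k ≤ m - i ∧ pvOnesV g i j k) := pvDfAux_ge_iff g j (m - i) i k

lemma pvRf_step (g : List (List Int)) (n i t : Nat) (ht : t < n) :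
    pvRf g n i t = if pvCell g i t = 1 then pvRf g n i (t+1) + 1 else 0 := by
  unfold pvRf
  rw [show n - t = (n - (t+1)) + 1 by omega]
  rfl

lemma pvDf_step (g : List (List Int)) (m t j : Nat) (ht : t < m) :
    pvDf g m t j = if pvCell g t j = 1 then pvDf g m (t+1) j + 1 else 0 := by
  unfold pvDf
  rw [show m - t = (m - (t+1)) + 1 by omega]
  rfl

lemma pvBRow_fold (g : List (List Int)) (m n i : Nat) (nextDown : List Nat)
    (hnext : ∀ j < n, nextDown.getD j 0 = pvDf g m (i+1) j) (hi : i < m) :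
    ∀ d t, t + d = n → (List.range' t d).reverse.foldl
      (fun (st : List Nat × List Nat × Nat) j =>
        if pvCell g i j = 1 then
          ((st.2.2 + 1) :: st.1, (nextDown.getD j 0 + 1) :: st.2.1, st.2.2 + 1)
        else (0 :: st.1, 0 :: st.2.1, 0))
      ([], [], 0) =
      ((List.range' t d).map (pvRf g n i), (List.range' t d).map (pvDf g m i), pvRf g n i t) := by
  intro d
  induction d with
  | zero =>
    intro t htn
    simp only [List.range', List.reverse_nil, List.foldl_nil, List.map_nil]
    unfold pvRf
    rw [show n - t = 0 by omega]
    rfl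
  | succ d ih =>
    intro t htn
    rw [List.range'_succ, List.reverse_cons, List.foldl_append, ih (t+1) (by omega)]
    simp only [List.foldl_cons, List.foldl_nil, List.map_cons]
    have hDf : pvDf g m i t = if pvCell g i t = 1 then nextDown.getD t 0 + 1 else 0 := by
      rw [pvDf_step g m i t hi, hnext t (by omega)]
    by_cases h : pvCell g i t = 1
    · rw [if_pos h, pvRf_step g n i t (by omega), if_pos h, hDf, if_pos h]
    · rw [if_neg h, pvRf_step g n i t (by omega), if_neg h, hDf, if_neg h]

-- the next_down row seen when row i is about to be processed
def pvNextRow (g : List (List Int)) (m n t : Nat) : List Nat :=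
  if t = m then List.replicate n 0 else (List.range n).map (pvDf g m t)

lemma pvNextRow_getD (g : List (List Int)) (m n t j : Nat) (hj : j < n) (ht : t ≤ m) :
    (pvNextRow g m n t).getD j 0 = pvDf g m t j := by
  by_cases h : t = m
  · rw [pvNextRow, if_pos h, h]
    have : pvDf g m m j = 0 := by unfold pvDf; rw [Nat.sub_self]; rfl
    simp [this, List.getD_eq_getElem?_getD, List.getElem?_replicate, hj]
  · rw [pvNextRow, if_neg h]
    simp [List.getD_eq_getElem?_getD, hj]

lemma pvBTables_eq (g : List (List Int)) (m n : Nat) :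
    pvBTables g m n =
      ((List.range m).map (fun i => (List.range n).map (pvRf g n i)),
       (List.range m).map (fun i => (List.range n).map (pvDf g m i))) := by
  have key : ∀ d t, t + d = m → (List.range' t d).reverse.foldl
      (fun (st : List (List Nat) × List (List Nat) × List Nat) i =>
        let rows := pvBRow g i n st.2.2
        (rows.1 :: st.1, rows.2 :: st.2.1, rows.2))
      ([], [], List.replicate n 0) =
      ((List.range' t d).map (fun i => (List.range n).map (pvRf g n i)),
       (List.range' t d).map (fun i => (List.range n).map (pvDf g m i)),
       pvNextRow g m n t) := by
    intro d
    induction d with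
    | zero =>
      intro t htm
      simp only [List.range', List.reverse_nil, List.foldl_nil, List.map_nil]
      rw [pvNextRow, if_pos (by omega)]
    | succ d ih =>
      intro t htm
      rw [List.range'_succ, List.reverse_cons, List.foldl_append, ih (t+1) (by omega)]
      simp only [List.foldl_cons, List.foldl_nil, List.map_cons]
      have hrow : pvBRow g t n (pvNextRow g m n (t+1)) =
          ((List.range n).map (pvRf g n t), (List.range n).map (pvDf g m t)) := by
        unfold pvBRow
        rw [show List.range n = List.range' 0 n from (List.range_eq_range' ..),
            pvBRow_fold g m n t (pvNextRow g m n (t+1))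
              (fun j hj => pvNextRow_getD g m n (t+1) j hj (by omega)) (by omega) n 0 (by omega)]
      rw [hrow, show pvNextRow g m n t = (List.range n).map (pvDf g m t) by
        rw [pvNextRow, if_neg (by omega)]]
  unfold pvBTables
  rw [show List.range m = List.range' 0 m from (List.range_eq_range' ..), key m 0 (by omega)]

lemma pvGetT_right (g : List (List Int)) (m n i j : Nat) (hi : i < m) (hj : j < n) :
    pvGetT (pvBTables g m n).1 i j = pvRf g n i j := by
  rw [pvBTables_eq]
  simp [pvGetT, List.getD_eq_getElem?_getD, hi, hj]

lemma pvGetT_down (g : List (List Int)) (m n i j : Nat) (hi : i < m) (hj : j < n) :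
    pvGetT (pvBTables g m n).2 i j = pvDf g m i j := by
  rw [pvBTables_eq]
  simp [pvGetT, List.getD_eq_getElem?_getD, hi, hj]

-- any bordered square at (i,j) fits under B's per-anchor cap min(right, down)
lemma pvSq_le_cap (g : List (List Int)) (m n i j k : Nat) (h : pvSq g m n i j k) :
    k ≤ min (pvRf g n i j) (pvDf g m i j) := by
  obtain ⟨-, h1, h2, hT, hL, -⟩ := h
  have hr : k ≤ pvRf g n i j := (pvRf_ge_iff g n i j k).2 ⟨by omega, hT⟩
  have hd : k ≤ pvDf g m i j := (pvDf_ge_iff g m i j k).2 ⟨by omega, hL⟩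
  omega

lemma pvM_le_cap (g : List (List Int)) (m n i j : Nat) :
    pvM g m n i j ≤ min (pvRf g n i j) (pvDf g m i j) := by
  by_cases h : pvM g m n i j = 0
  · omega
  · exact pvSq_le_cap g m n i j _ (pvM_spec g m n i j (by omega))

-- B's two-lookup test decides exactly pvSq under the cap
lemma pvCheck_iff (g : List (List Int)) (m n i j k : Nat) (hi : i < m) (hj : j < n)
    (hk : k + 1 ≤ min (pvRf g n i j) (pvDf g m i j)) :
    (k+1 ≤ pvGetT (pvBTables g m n).1 (i+k) j ∧ k+1 ≤ pvGetT (pvBTables g m n).2 i (j+k))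
      ↔ pvSq g m n i j (k+1) := by
  have hr := (pvRf_ge_iff g n i j (k+1)).1 (by omega)
  have hd := (pvDf_ge_iff g m i j (k+1)).1 (by omega)
  have hi' : i + k < m := by omega
  have hj' : j + k < n := by omega
  rw [pvGetT_right g m n (i+k) j hi' hj, pvGetT_down g m n i (j+k) hi hj',
      pvRf_ge_iff, pvDf_ge_iff]
  constructor
  · rintro ⟨⟨-, h1⟩, -, h2⟩
    exact ⟨by omega, by omega, by omega, hr.2, hd.2, h1, h2⟩
  · rintro ⟨-, -, -, -, -, h1, h2⟩
    exact ⟨⟨by omega, h1⟩, by omega, h2⟩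

lemma pvBInner_eq (g : List (List Int)) (m n i j : Nat) (hi : i < m) (hj : j < n) :
    ∀ K best, pvM g m n i j ≤ K → K ≤ min (pvRf g n i j) (pvDf g m i j) →
      pvBInner (pvBTables g m n).1 (pvBTables g m n).2 i j K best =
        max best (pvM g m n i j) := by
  intro K
  induction K with
  | zero => intro best hM _; simp only [pvBInner]; omega
  | succ K ih =>
    intro best hM hK
    simp only [pvBInner]
    by_cases hb : best < K + 1
    · rw [if_pos hb]
      by_cases hc : (K+1 ≤ pvGetT (pvBTables g m n).1 (i+K) j ∧
          K+1 ≤ pvGetT (pvBTables g m n).2 i (j+K))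
      · rw [if_pos hc]
        have hsq := (pvCheck_iff g m n i j K hi hj hK).1 hc
        have := le_pvM g m n i j (K+1) hsq
        omega
      · rw [if_neg hc]
        have hne : pvM g m n i j ≠ K + 1 := by
          intro he
          exact hc ((pvCheck_iff g m n i j K hi hj hK).2 (he ▸ pvM_spec g m n i j (by omega)))
        exact ih best (by omega) (by omega)
    · rw [if_neg hb]; omega

-- ---- putting it together ----

lemma pvFold_eq (g : List (List Int)) (m n : Nat) :
    (List.range m).foldl (fun maxLen i =>
        (List.range n).foldl (fun maxLen j =>
          if pvCell g i j = 1 then pvAWhile g m n i j m maxLen maxLen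
          else maxLen) maxLen) 0 =
    (List.range m).foldl (fun best i =>
        (List.range n).foldl (fun best j =>
          pvBInner (pvBTables g m n).1 (pvBTables g m n).2 i j
            (min (pvGetT (pvBTables g m n).1 i j) (pvGetT (pvBTables g m n).2 i j)) best)
          best) 0 := by
  apply PySem.List.foldl_congr_mem
  intro acc i hi
  apply PySem.List.foldl_congr_mem
  intro acc' j hj
  rw [List.mem_range] at hi hj
  rw [pvA_step, pvGetT_right g m n i j hi hj, pvGetT_down g m n i j hi hj,
      pvBInner_eq g m n i j hi hj _ acc' (pvM_le_cap g m n i j) le_rfl]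

-- ===== VERDICT (by name: the statement is the Claim_ definition above) =====
theorem max_1_bordered_matrix_spec : Claim_equal_max_1_bordered_matrix := by
  intro grid _ _
  unfold Spec_max_1_bordered_matrix max_1_bordered_matrix max_1_bordered_matrix_alt
  by_cases h : grid.length = 0 ∨ (grid.headD []).length = 0
  · rw [if_pos h, if_pos h]
  · rw [if_neg h, if_neg h]
    exact congrArg Int.ofNat (pvFold_eq grid grid.length (grid.headD []).length)
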